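-- pv_equiv track=rewrite | github.com/miliar/Code_Jam_Webscraper | solutions_python/Problem_10/78.py | calc
-- ===== SOURCE A (Python) =====
-- def calc(P,K,L,tbl):
--     tbl.sort()
--     tbl.reverse()
--     count = 0
--     n = 1
--     k = K
--     for x in tbl:
--         count += n*x
--         k -= 1
--         if k == 0:
--             n += 1
--             k = K
--     return count
-- ===== SOURCE B (Python) =====
-- def calc(P, K, L, tbl):
--     # Block decomposition: element i's weight floor(i/K)+1 is the number of
--     # block starts b*K <= i, so each block contributes the suffix sum from its
--     # start.  Sorts tbl descending in place, like the original.
--     tbl.sort(reverse=True)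
--     ans = 0
--     for start in range(0, len(tbl), K):
--         ans += sum(tbl[start:])
--     return ans
-- ===== Notes on version B (the rewrite author's own statement) =====
-- stated objective: alternative
-- what changed: Replaces the single weighted pass with a weight/block-countdown counter by a block decomposition: one stride-K range loop adding the suffix sum from each block start; the in-place descending sort is kept.
-- outside the precondition, e.g. on calc(0, 0, 0, [1, 2]): A returns 3, B raises ValueError; on calc(0, -2, 0, [1, 2]): A returns 3, B returns 0
import Mathlib
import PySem

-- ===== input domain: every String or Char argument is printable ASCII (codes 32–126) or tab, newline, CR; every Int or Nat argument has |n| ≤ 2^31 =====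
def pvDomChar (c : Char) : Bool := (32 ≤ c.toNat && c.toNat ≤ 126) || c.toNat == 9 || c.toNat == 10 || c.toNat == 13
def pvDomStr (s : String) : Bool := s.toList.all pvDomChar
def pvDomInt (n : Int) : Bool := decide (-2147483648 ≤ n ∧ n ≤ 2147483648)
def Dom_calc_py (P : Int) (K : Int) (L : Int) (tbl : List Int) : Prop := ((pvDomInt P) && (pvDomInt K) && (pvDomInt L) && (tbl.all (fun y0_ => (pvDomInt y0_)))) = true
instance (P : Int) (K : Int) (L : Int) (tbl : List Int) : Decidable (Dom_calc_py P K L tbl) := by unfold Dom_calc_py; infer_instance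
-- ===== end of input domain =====

-- B replaces A's weighted single pass by a stride-K block loop of suffix sums (same in-place
-- descending sort of tbl; the equivalence proved is about the return value).

-- ===== PORT A =====
-- literal port of A: sort ascending, reverse, then one pass with state (count, n, k)
def calc_py (P : Int) (K : Int) (L : Int) (tbl : List Int) : Int :=
  let t := (PySem.List.sorted tbl id).reverse
  (t.foldl (fun (s : Int × Int × Int) x =>
      let count := s.1 + s.2.1 * x
      let k := s.2.2 - 1
      if k = 0 then (count, s.2.1 + 1, K) else (count, s.2.1, k))
    (0, 1, K)).1

-- ===== PORT B =====
-- literal port of B: sort descending in place, then for start in range(0, len(tbl), K): ans += sum(tbl[start:])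
def calc_py_alt (P : Int) (K : Int) (L : Int) (tbl : List Int) : Int :=
  let t := PySem.List.sorted tbl id true
  (PySem.List.pyRange 0 (t.length : Int) K).foldl
    (fun ans start => ans + (PySem.List.slice t (some start) none).sum) 0

-- ===== PRECONDITION & SPEC =====
-- Pre_ excludes K ≤ 0, where B's stride-K range raises ValueError (K = 0) or visits no
-- blocks; A there returns the plain sum because its block countdown never fires.
def Pre_calc_py (P : Int) (K : Int) (L : Int) (tbl : List Int) : Prop := 1 ≤ K
instance (P : Int) (K : Int) (L : Int) (tbl : List Int) : Decidable (Pre_calc_py P K L tbl) := by unfold Pre_calc_py; infer_instance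
def pvWitness_calc_py : Int × Int × Int × List Int := (0, 2, 0, [3, 1, 2])
def Spec_calc_py (P : Int) (K : Int) (L : Int) (tbl : List Int) (out : Int) : Prop := out = calc_py_alt P K L tbl
instance (P : Int) (K : Int) (L : Int) (tbl : List Int) (out : Int) : Decidable (Spec_calc_py P K L tbl out) := by unfold Spec_calc_py; infer_instance

-- ===== CLAIM (what is proved, stated in full; the proofs are below) =====
def Claim_equal_calc_py : Prop := ∀ (P : Int) (K : Int) (L : Int) (tbl : List Int), Dom_calc_py P K L tbl → Pre_calc_py P K L tbl → Spec_calc_py P K L tbl (calc_py P K L tbl)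

-- ===== LEMMAS AND PROOFS =====

-- A's loop body, named for the proofs (definitionally the lambda in calc_py)
def astep (K : Int) : Int × Int × Int → Int → Int × Int × Int :=
  fun s x => if s.2.2 - 1 = 0 then (s.1 + s.2.1 * x, s.2.1 + 1, K)
             else (s.1 + s.2.1 * x, s.2.1, s.2.2 - 1)

-- descending-sorted list: ascending sort reversed = sorted with reverse=True (Int values)
theorem rev_sorted_eq (tbl : List Int) :
    (PySem.List.sorted tbl id).reverse = PySem.List.sorted tbl id true := by
  apply List.Perm.eq_of_pairwise (le := fun a b : Int => b ≤ a)
  · intro a b _ _ h1 h2; omega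
  · simpa [List.pairwise_reverse] using PySem.List.sorted_pairwise tbl id
  · exact PySem.List.sorted_pairwise_rev tbl id
  · exact ((List.reverse_perm _).trans (PySem.List.sorted_perm tbl id false)).trans
      (PySem.List.sorted_perm tbl id true).symm

-- sum of suffix blocks: the common value both loops compute
def bsum (Km1 : Nat) : List Int → Int
  | [] => 0
  | x :: rest => x + rest.sum + bsum Km1 (rest.drop Km1)
termination_by t => t.length
decreasing_by simp

theorem bsum_nil (Km1 : Nat) : bsum Km1 [] = 0 := bsum.eq_1 Km1

theorem bsum_cons (Km1 : Nat) (x : Int) (rest : List Int) :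
    bsum Km1 (x :: rest) = x + rest.sum + bsum Km1 (rest.drop Km1) := bsum.eq_2 Km1 x rest

theorem bsum_eq (Km1 : Nat) (t : List Int) :
    bsum Km1 t = t.sum + bsum Km1 (t.drop (Km1 + 1)) := by
  cases t with
  | nil => simp [bsum_nil]
  | cons x rest => rw [bsum_cons, List.drop_succ_cons, List.sum_cons]

-- A's loop invariant: from state (c0, n0, k0) with 1 ≤ k0 the pass computes
-- c0 + n0 * sum t + bsum (K-1) (drop k0 t)
theorem aside (K : Int) (hK : 1 ≤ K) (t : List Int) :
    ∀ (c0 n0 k0 : Int), 1 ≤ k0 →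
    (t.foldl (astep K) (c0, n0, k0)).1
      = c0 + n0 * t.sum + bsum (K.toNat - 1) (t.drop k0.toNat) := by
  induction t with
  | nil => intro c0 n0 k0 _; simp [bsum_nil]
  | cons x rest ih =>
    intro c0 n0 k0 hk0
    rw [List.foldl_cons]
    by_cases h1 : k0 - 1 = 0
    · have hk1 : k0 = 1 := by omega
      subst hk1
      rw [show astep K (c0, n0, 1) x = (c0 + n0 * x, n0 + 1, K) from by simp [astep]]
      rw [ih (c0 + n0 * x) (n0 + 1) K hK]
      have e : bsum (K.toNat - 1) rest
          = rest.sum + bsum (K.toNat - 1) (rest.drop K.toNat) := by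
        rw [bsum_eq (K.toNat - 1) rest, show K.toNat - 1 + 1 = K.toNat from by omega]
      rw [show List.drop (1 : Int).toNat (x :: rest) = rest from rfl, e, List.sum_cons]
      ring
    · rw [show astep K (c0, n0, k0) x = (c0 + n0 * x, n0, k0 - 1) from by
        simp [astep, h1]]
      rw [ih (c0 + n0 * x) n0 (k0 - 1) (by omega)]
      have hdrop : (x :: rest).drop k0.toNat = rest.drop (k0 - 1).toNat := by
        have h : k0.toNat = (k0 - 1).toNat + 1 := by omega
        rw [h, List.drop_succ_cons]
      rw [hdrop, List.sum_cons]
      ring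

-- step-K range structure lemmas
theorem pyRange_pos_eq_nil (a b s : Int) (hs : 0 < s) (h : b ≤ a) :
    PySem.List.pyRange a b s = [] := by
  rw [PySem.List.pyRange_of_pos a b hs, if_neg (by omega)]; simp

theorem pyRange_pos_cons (a b s : Int) (hs : 0 < s) (h : a < b) :
    PySem.List.pyRange a b s = a :: PySem.List.pyRange (a + s) b s := by
  rw [PySem.List.pyRange_of_pos a b hs, PySem.List.pyRange_of_pos (a + s) b hs]
  have hdiv : (b - a + s - 1) / s = (b - a - 1) / s + 1 := by
    rw [show b - a + s - 1 = (b - a - 1) + 1 * s from by ring,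
      Int.add_mul_ediv_right _ _ (by omega)]
  have hq0 : 0 ≤ (b - a - 1) / s := Int.ediv_nonneg (by omega) (by omega)
  have hN : ((b - a + s - 1) / s).toNat = ((b - a - 1) / s).toNat + 1 := by
    rw [hdiv]; omega
  have hN' : (if a + s < b then ((b - (a + s) + s - 1) / s).toNat else 0)
      = ((b - a - 1) / s).toNat := by
    by_cases hc : a + s < b
    · rw [if_pos hc]; congr 2; ring
    · rw [if_neg hc,
        show (b - a - 1) / s = 0 from Int.ediv_eq_zero_of_lt (by omega) (by omega)]
      simp
  rw [if_pos h, hN, hN', List.range_succ_eq_map, List.map_cons, List.map_map]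
  refine List.cons_eq_cons.mpr ⟨by simp, List.map_congr_left fun k _ => ?_⟩
  simp [Function.comp]; ring

theorem pyRange_shift (a b c s : Int) (hs : 0 < s) :
    PySem.List.pyRange (a + c) (b + c) s = (PySem.List.pyRange a b s).map (c + ·) := by
  rw [PySem.List.pyRange_of_pos a b hs, PySem.List.pyRange_of_pos (a + c) (b + c) hs,
    show b + c - (a + c) = b - a from by ring, List.map_map]
  by_cases hab : a < b
  · rw [if_pos hab, if_pos (by omega)]
    exact List.map_congr_left fun k _ => by simp [Function.comp]; ring
  · rw [if_neg hab, if_neg (by omega)]; simp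

-- B's loop computes bsum over the descending list (strong induction on length)
theorem bside (K : Int) (hK : 1 ≤ K) (t : List Int) (a : Int) :
    (PySem.List.pyRange 0 (t.length : Int) K).foldl
      (fun ans start => ans + (PySem.List.slice t (some start) none).sum) a
    = a + bsum (K.toNat - 1) t := by
  by_cases hnil : t = []
  · subst hnil
    rw [show ((List.length ([] : List Int) : Int)) = 0 from by simp,
      pyRange_pos_eq_nil 0 0 K (by omega) le_rfl, bsum_nil]
    simp
  · have hlen : 0 < t.length := List.length_pos_iff.mpr hnil
    rw [pyRange_pos_cons 0 (t.length : Int) K (by omega) (by exact_mod_cast hlen),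
      List.foldl_cons, PySem.List.slice_zero_start, PySem.List.slice_none_none, zero_add]
    set t' := t.drop K.toNat with ht'
    by_cases hle : (t.length : Int) ≤ K
    · -- a single block: the shifted range is empty
      rw [pyRange_pos_eq_nil K _ K (by omega) hle, List.foldl_nil,
        bsum_eq (K.toNat - 1) t, show K.toNat - 1 + 1 = K.toNat from by omega,
        List.drop_eq_nil_of_le (by omega), bsum_nil]
      ring
    · -- recurse on the K-dropped suffix
      have hlt : t'.length < t.length := by
        rw [ht', List.length_drop]; omega
      have hlen' : (t'.length : Int) = (t.length : Int) - K := by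
        rw [ht', List.length_drop]; omega
      have hshift := pyRange_shift 0 (t'.length : Int) K K (by omega)
      rw [show (0 : Int) + K = K from by ring,
        show (t'.length : Int) + K = (t.length : Int) from by omega] at hshift
      rw [hshift, List.foldl_map]
      rw [PySem.List.foldl_congr_mem _ _
        (fun ans start => ans + (PySem.List.slice t' (some start) none).sum) _ ?_]
      · rw [bside K hK t' (a + t.sum), bsum_eq (K.toNat - 1) t,
          show K.toNat - 1 + 1 = K.toNat from by omega, ← ht']
        ring
      · intro acc x hx
        have hx0 : 0 ≤ x := by
          rcases (PySem.List.mem_pyRange_iff_of_pos (by omega : (0 : Int) < K) x).1 hx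
            with ⟨h1, _, _⟩
          omega
        have hidx : (K + x).toNat = K.toNat + x.toNat := by omega
        simp only []
        rw [PySem.List.slice_from t (by omega : (0 : Int) ≤ K + x),
          PySem.List.slice_from t' hx0, ht', List.drop_drop, hidx]
termination_by t.length
decreasing_by exact hlt

-- ===== VERDICT (by name: the statement is the Claim_ definition above) =====
theorem calc_py_spec : Claim_equal_calc_py := by
  intro P K L tbl _ hKpre
  have hK : 1 ≤ K := hKpre
  unfold Spec_calc_py calc_py calc_py_alt
  rw [rev_sorted_eq tbl]
  set t := PySem.List.sorted tbl id true
  rw [show (fun (s : Int × Int × Int) x =>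
      let count := s.1 + s.2.1 * x
      let k := s.2.2 - 1
      if k = 0 then (count, s.2.1 + 1, K) else (count, s.2.1, k)) = astep K from rfl]
  rw [aside K hK t 0 1 K hK, bside K hK t 0, bsum_eq (K.toNat - 1) t,
    show K.toNat - 1 + 1 = K.toNat from by omega]
  ring
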